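-- pv_equiv track=rewrite | github.com/paolacampossilva/matrizes_algprog1 | lista_codigos.py | loteria_esportiva
-- ===== SOURCE A (Python) =====
-- def loteria_esportiva(apostas, gabarito):
--     pontos_totais = 0
--     qte_apostas = [0] * 3
--     for i in range(len(apostas)):
--         pontos = 0
--         for j in range(len(apostas[i])):
--             if apostas[i][j] == 1 and gabarito[i] == j + 1:
--                 pontos_totais = pontos_totais + 1
--             if apostas[i][j] == 1:
--                 pontos = pontos + 1
--         if pontos != 0:
--             qte_apostas[pontos - 1] = qte_apostas[pontos - 1] + 1
--     return pontos_totais, qte_apostas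
-- ===== SOURCE B (Python) =====
-- def loteria_esportiva(apostas, gabarito):
--     counts = [row.count(1) for row in apostas]
--     pontos_totais = sum(1 for row, g in zip(apostas, gabarito)
--                         if 1 <= g <= len(row) and row[g - 1] == 1)
--     qte_apostas = [counts.count(p) for p in (1, 2, 3)]
--     return pontos_totais, qte_apostas
-- ===== Notes on version B (the rewrite author's own statement) =====
-- stated objective: simpler
-- what changed: B replaces A's single accumulator loop with nested scans by three staged declarative passes: a counts list via row.count(1), the total via one zip+sum of direct bounds-checked hits, and the histogram computed at the end as counts.count(p) for p in 1..3 instead of in-place bucket increments per row. The staged passes run in C-level builtins (count/sum/zip) instead of an interpreted per-element inner loop.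
import Mathlib
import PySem

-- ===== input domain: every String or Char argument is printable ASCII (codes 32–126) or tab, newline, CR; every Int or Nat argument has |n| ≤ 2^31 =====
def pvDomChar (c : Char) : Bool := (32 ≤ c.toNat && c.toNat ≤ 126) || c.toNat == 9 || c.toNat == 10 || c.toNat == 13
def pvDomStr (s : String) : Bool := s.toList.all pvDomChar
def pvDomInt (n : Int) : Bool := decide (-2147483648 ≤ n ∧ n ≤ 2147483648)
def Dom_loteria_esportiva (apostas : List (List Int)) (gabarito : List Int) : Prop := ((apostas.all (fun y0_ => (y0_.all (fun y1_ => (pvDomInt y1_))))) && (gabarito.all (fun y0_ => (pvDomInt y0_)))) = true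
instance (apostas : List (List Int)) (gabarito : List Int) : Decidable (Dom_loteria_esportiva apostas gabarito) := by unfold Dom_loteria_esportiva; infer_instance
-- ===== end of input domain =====

-- B recasts A's single stateful loop as three staged declarative passes (per-row counts,
-- one zip pass of direct hit tests, histogram by counting the counts); objective: simpler.

-- ===== PORT A =====
-- inner loop 'for j in range(len(row))' over (pontos_totais, pontos); j carried explicitly
def lotInnerA (g : Int) : List Int → Int → Int × Int → Int × Int
  | [], _, pt => pt
  | a :: rest, j, pt =>
      let pt1 := if a = 1 ∧ g = j + 1 then (pt.1 + 1, pt.2) else pt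
      let pt2 := if a = 1 then (pt1.1, pt1.2 + 1) else pt1
      lotInnerA g rest (j + 1) pt2

-- outer loop 'for i in range(len(apostas))' over (pontos_totais, qte_apostas); i carried explicitly
def lotOuterA (gabarito : List Int) : List (List Int) → Int → Int × List Int → Int × List Int
  | [], _, st => st
  | row :: rest, i, st =>
      let pt := lotInnerA (PySem.List.pyGetD gabarito i 0) row 0 (st.1, 0)
      let q := if pt.2 ≠ 0 then st.2.set (pt.2 - 1).toNat (st.2.getD (pt.2 - 1).toNat 0 + 1) else st.2
      lotOuterA gabarito rest (i + 1) (pt.1, q)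

def loteria_esportiva (apostas : List (List Int)) (gabarito : List Int) : Int × List Int :=
  lotOuterA gabarito apostas 0 (0, [0, 0, 0])

-- ===== PORT B =====
def loteria_esportiva_alt (apostas : List (List Int)) (gabarito : List Int) : Int × List Int :=
  let counts : List Int := apostas.map (fun row => ((PySem.List.count row 1 : Nat) : Int))
  let pontos_totais : Int := (apostas.zip gabarito).foldl (fun s p =>
      if 1 ≤ p.2 ∧ p.2 ≤ (p.1.length : Int) ∧ PySem.List.pyGetD p.1 (p.2 - 1) 0 = 1 then s + 1 else s) 0
  (pontos_totais, ([1, 2, 3] : List Int).map (fun p => ((PySem.List.count counts p : Nat) : Int)))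

-- ===== PRECONDITION & SPEC =====
-- Pre_ excludes exactly the inputs on which Python A raises IndexError: a row with more than
-- three 1s (qte_apostas[pontos-1]), or a row containing a 1 whose index has no gabarito entry.
def Pre_loteria_esportiva (apostas : List (List Int)) (gabarito : List Int) : Prop :=
  ∀ k (h : k < apostas.length), apostas[k].count 1 ≤ 3 ∧ ((1 : Int) ∈ apostas[k] → k < gabarito.length)
instance (apostas : List (List Int)) (gabarito : List Int) : Decidable (Pre_loteria_esportiva apostas gabarito) := by unfold Pre_loteria_esportiva; infer_instance
def pvWitness_loteria_esportiva : List (List Int) × List Int := ([[1, 0, 1], [0, 0], [1, 1, 1]], [3, 1, 2])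

def Spec_loteria_esportiva (apostas : List (List Int)) (gabarito : List Int) (out : Int × List Int) : Prop := out = loteria_esportiva_alt apostas gabarito
instance (apostas : List (List Int)) (gabarito : List Int) (out : Int × List Int) : Decidable (Spec_loteria_esportiva apostas gabarito out) := by unfold Spec_loteria_esportiva; infer_instance

-- ===== CLAIM (what is proved, stated in full; the proofs are below) =====
def Claim_equal_loteria_esportiva : Prop := ∀ (apostas : List (List Int)) (gabarito : List Int), Dom_loteria_esportiva apostas gabarito → Pre_loteria_esportiva apostas gabarito → Spec_loteria_esportiva apostas gabarito (loteria_esportiva apostas gabarito)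

-- ===== LEMMAS AND PROOFS =====

-- closed form of A's inner loop: the total gains 1 iff position g-j-1 of the row holds a 1,
-- and pontos gains the row's count of 1s
theorem lotInnerA_spec (g : Int) (row : List Int) (j t p : Int) :
    lotInnerA g row j (t, p) =
      (t + (if 1 ≤ g - j ∧ g - j ≤ (row.length : Int) ∧ row.getD (g - j - 1).toNat 0 = 1 then 1 else 0),
       p + (row.count 1 : Nat)) := by
  induction row generalizing j t p with
  | nil =>
      simp only [lotInnerA, List.length_nil, Nat.cast_zero, List.count_nil, add_zero]
      rw [if_neg (by rintro ⟨h1, h2, -⟩; omega)]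
      simp
  | cons a rest ih =>
      simp only [lotInnerA]
      by_cases hg : g = j + 1
      · by_cases ha : a = 1
        · rw [if_pos ha, if_pos (⟨ha, hg⟩ : a = 1 ∧ g = j + 1), ih]
          rw [if_neg (by rintro ⟨h1, -, -⟩; omega)]
          rw [if_pos ⟨by omega, by simp; omega,
            by rw [show (g - j - 1).toNat = 0 by omega, List.getD_cons_zero]; exact ha⟩]
          refine Prod.ext (by simp) (by simp [ha]; omega)
        · rw [if_neg ha, if_neg (fun h => ha h.1), ih]
          rw [if_neg (by rintro ⟨h1, -, -⟩; omega)]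
          rw [if_neg (by
            rintro ⟨-, -, h3⟩
            rw [show (g - j - 1).toNat = 0 by omega, List.getD_cons_zero] at h3
            exact ha h3)]
          refine Prod.ext (by simp) (by simp [ha])
      · have hCC : (1 ≤ g - j ∧ g - j ≤ ((a :: rest).length : Int) ∧ (a :: rest).getD (g - j - 1).toNat 0 = 1)
            ↔ (1 ≤ g - (j + 1) ∧ g - (j + 1) ≤ (rest.length : Int) ∧ rest.getD (g - (j + 1) - 1).toNat 0 = 1) := by
          by_cases h2 : 2 ≤ g - j
          · have hn : (g - j - 1).toNat = (g - (j + 1) - 1).toNat + 1 := by omega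
            rw [hn, List.getD_cons_succ]
            constructor
            · rintro ⟨-, hb, h3⟩; exact ⟨by omega, by simp at hb; omega, h3⟩
            · rintro ⟨-, hb, h3⟩; exact ⟨by omega, by simp; omega, h3⟩
          · constructor
            · rintro ⟨h1, -, -⟩; omega
            · rintro ⟨h1, -, -⟩; omega
        by_cases ha : a = 1
        · rw [if_pos ha, if_neg (fun h => hg h.2), ih]
          refine Prod.ext ?_ (by simp [ha]; omega)
          simp only [hCC]
        · rw [if_neg ha, if_neg (fun h => hg h.2), ih]
          refine Prod.ext ?_ (by simp [ha])
          simp only [hCC]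

-- pyGetD into a cons at index i+1 reads the tail at index i
theorem pyGetD_cons_succ_int (g0 : Int) (gs : List Int) (i d : Int) (hi : 0 ≤ i) :
    PySem.List.pyGetD (g0 :: gs) (i + 1) d = PySem.List.pyGetD gs i d := by
  rw [PySem.List.pyGetD_of_nonneg _ d (by omega), PySem.List.pyGetD_of_nonneg _ d hi,
    show (i + 1).toNat = i.toNat + 1 by omega, List.getD_cons_succ]

-- dropping the consumed head of gabarito while decrementing A's row index
theorem lotOuterA_shift (apostas : List (List Int)) (g0 : Int) (gs : List Int) :
    ∀ (i : Int), 0 ≤ i → ∀ st, lotOuterA (g0 :: gs) apostas (i + 1) st = lotOuterA gs apostas i st := by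
  induction apostas with
  | nil => intro i _ st; simp [lotOuterA]
  | cons row rest ih =>
      intro i hi st
      simp only [lotOuterA, pyGetD_cons_succ_int g0 gs i 0 hi]
      rw [show i + 1 + 1 = (i + 1) + 1 from rfl, ih (i + 1) (by omega)]

-- with an exhausted gabarito every per-row hit test fails; only the count histogram grows
theorem lotOuterA_nil (apostas : List (List Int)) :
    ∀ (i t : Int) (q : List Int), 0 ≤ i →
      lotOuterA [] apostas i (t, q) =
        (t, (apostas.map (fun row => ((PySem.List.count row 1 : Nat) : Int))).foldl
              (fun q c => if c ≠ 0 then q.set (c - 1).toNat (q.getD (c - 1).toNat 0 + 1) else q) q) := by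
  induction apostas with
  | nil => intro i t q _; simp [lotOuterA]
  | cons row rest ih =>
      intro i t q hi
      have hg : PySem.List.pyGetD ([] : List Int) i 0 = 0 := by
        rw [PySem.List.pyGetD_of_nonneg _ 0 hi]; simp
      simp only [lotOuterA, hg, lotInnerA_spec, List.map_cons, List.foldl_cons, zero_add]
      rw [if_neg (by rintro ⟨h1, -, -⟩; omega), add_zero, PySem.List.count_eq]
      exact ih (i + 1) t _ (by omega)

-- closed form of A's outer loop: first component is B's zip pass, second is the
-- histogram fold over the per-row counts
theorem lotOuterA_char (apostas : List (List Int)) :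
    ∀ (gab : List Int) (t : Int) (q : List Int),
      lotOuterA gab apostas 0 (t, q) =
        ((apostas.zip gab).foldl (fun s p =>
            if 1 ≤ p.2 ∧ p.2 ≤ (p.1.length : Int) ∧ PySem.List.pyGetD p.1 (p.2 - 1) 0 = 1 then s + 1 else s) t,
         (apostas.map (fun row => ((PySem.List.count row 1 : Nat) : Int))).foldl
            (fun q c => if c ≠ 0 then q.set (c - 1).toNat (q.getD (c - 1).toNat 0 + 1) else q) q) := by
  induction apostas with
  | nil => intro gab t q; simp [lotOuterA]
  | cons row rest ih =>
      intro gab t q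
      cases gab with
      | nil =>
          have := lotOuterA_nil (row :: rest) 0 t q (by omega)
          simpa using this
      | cons g gs =>
          simp only [lotOuterA, PySem.List.pyGetD_zero_cons, lotInnerA_spec, zero_add, sub_zero,
            List.zip_cons_cons, List.foldl_cons, List.map_cons, PySem.List.count_eq]
          have hiff : (1 ≤ g ∧ g ≤ (row.length : Int) ∧ row.getD (g - 1).toNat 0 = 1)
              ↔ (1 ≤ g ∧ g ≤ (row.length : Int) ∧ PySem.List.pyGetD row (g - 1) 0 = 1) := by
            by_cases h1 : 1 ≤ g
            · rw [PySem.List.pyGetD_of_nonneg row 0 (by omega)]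
            · simp [h1]
          simp only [hiff]
          have hshift := lotOuterA_shift rest g gs 0 (by omega)
          simp only [zero_add] at hshift
          rw [hshift, ih gs]
          by_cases hC : (1 ≤ g ∧ g ≤ (row.length : Int) ∧ PySem.List.pyGetD row (g - 1) 0 = 1)
          · rw [if_pos hC, if_pos hC]; simp only [PySem.List.count_eq]
          · rw [if_neg hC, if_neg hC, add_zero]; simp only [PySem.List.count_eq]

-- the histogram fold over bounded counts is counting: each bucket p ends at start + count p
theorem histo_fold_char (cs : List Int) :
    ∀ (a b c : Int), (∀ x ∈ cs, 0 ≤ x ∧ x ≤ 3) →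
      cs.foldl (fun q c => if c ≠ 0 then q.set (c - 1).toNat (q.getD (c - 1).toNat 0 + 1) else q) [a, b, c] =
        [a + (cs.count 1 : Nat), b + (cs.count 2 : Nat), c + (cs.count 3 : Nat)] := by
  induction cs with
  | nil => intro a b c _; simp
  | cons x rest ih =>
      intro a b c hb
      have hx := hb x (by simp)
      have hrest : ∀ y ∈ rest, 0 ≤ y ∧ y ≤ 3 := fun y hy => hb y (by simp [hy])
      have h0123 : x = 0 ∨ x = 1 ∨ x = 2 ∨ x = 3 := by omega
      rcases h0123 with h | h | h | h <;> subst h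
      · rw [List.foldl_cons,
          show (if (0 : Int) ≠ 0 then [a, b, c].set ((0 : Int) - 1).toNat ([a, b, c].getD ((0 : Int) - 1).toNat 0 + 1) else [a, b, c]) = [a, b, c] from by norm_num,
          ih a b c hrest]
        simp
      · rw [List.foldl_cons,
          show (if (1 : Int) ≠ 0 then [a, b, c].set ((1 : Int) - 1).toNat ([a, b, c].getD ((1 : Int) - 1).toNat 0 + 1) else [a, b, c]) = [a + 1, b, c] from by norm_num [List.getD],
          ih _ _ _ hrest]
        simp; omega
      · rw [List.foldl_cons,
          show (if (2 : Int) ≠ 0 then [a, b, c].set ((2 : Int) - 1).toNat ([a, b, c].getD ((2 : Int) - 1).toNat 0 + 1) else [a, b, c]) = [a, b + 1, c] from by norm_num [List.getD],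
          ih _ _ _ hrest]
        simp; omega
      · rw [List.foldl_cons,
          show (if (3 : Int) ≠ 0 then [a, b, c].set ((3 : Int) - 1).toNat ([a, b, c].getD ((3 : Int) - 1).toNat 0 + 1) else [a, b, c]) = [a, b, c + 1] from by norm_num [List.getD, show Int.toNat 2 = 2 from rfl],
          ih _ _ _ hrest]
        simp; omega

-- ===== VERDICT (by name: the statement is the Claim_ definition above) =====
theorem loteria_esportiva_spec : Claim_equal_loteria_esportiva := by
  intro apostas gabarito _ hpre
  unfold Spec_loteria_esportiva loteria_esportiva loteria_esportiva_alt
  rw [lotOuterA_char apostas gabarito 0 [0, 0, 0]]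
  have hbound : ∀ x ∈ apostas.map (fun row => ((PySem.List.count row 1 : Nat) : Int)), 0 ≤ x ∧ x ≤ 3 := by
    intro x hx
    rcases List.mem_map.mp hx with ⟨row, hrow, rfl⟩
    rcases List.mem_iff_getElem.mp hrow with ⟨k, hk, rfl⟩
    have := (hpre k hk).1
    rw [PySem.List.count_eq]
    omega
  rw [histo_fold_char _ 0 0 0 hbound]
  simp [PySem.List.count_eq]
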